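-- pv_equiv track=rewrite | github.com/phamdinhdat-ai/magst | deployment/app/agents/retrievers/backup/drug_retriever.py | parse_drug_document
-- ===== SOURCE A (Python) =====
-- from typing import Optional, List, Dict, Any
--
-- def parse_drug_document(content: str) -> Dict[str, str]:
--     """Parse drug document to extract structured information"""
--     lines = content.split('\n')
--     parsed = {
--         'drug_name': '',
--         'target': '',
--         'description': '',
--         'category': '',
--         'source': '',
--         'recommendation': ''
--     }
--
--     for line in lines:
--         line = line.strip()
--         if line.startswith('Loai Thuoc:'):
--             parsed['drug_name'] = line.replace('Loai Thuoc:', '').strip()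
--         elif line.startswith('Doi Tuong:'):
--             parsed['target'] = line.replace('Doi Tuong:', '').strip()
--         elif line.startswith('Mo ta:'):
--             parsed['description'] = line.replace('Mo ta:', '').strip()
--         elif line.startswith('Phan Loai:'):
--             parsed['category'] = line.replace('Phan Loai:', '').strip()
--         elif line.startswith('Nguon:'):
--             parsed['source'] = line.replace('Nguon:', '').strip()
--         elif line.startswith('Khuyen cao:'):
--             parsed['recommendation'] = line.replace('Khuyen cao:', '').strip()
--
--     return parsed
-- ===== SOURCE B (Python) =====
-- FIELDS = [
--     ('Loai Thuoc:', 'drug_name'),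
--     ('Doi Tuong:', 'target'),
--     ('Mo ta:', 'description'),
--     ('Phan Loai:', 'category'),
--     ('Nguon:', 'source'),
--     ('Khuyen cao:', 'recommendation'),
-- ]
--
--
-- def parse_drug_document(content: str) -> dict:
--     """Field-major parse: for each field, scan the stripped lines back to front
--     and keep the first (i.e. last-written) matching line's value."""
--     lines = [line.strip() for line in content.split('\n')]
--     result = {}
--     for prefix, field in FIELDS:
--         value = ''
--         for line in reversed(lines):
--             if line.startswith(prefix):
--                 value = line.replace(prefix, '').strip()
--                 break
--         result[field] = value
--     return result
-- ===== Notes on version B (the rewrite author's own statement) =====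
-- stated objective: alternative
-- what changed: Replaces the line-major if/elif chain that overwrites a pre-filled dict with a field-major scan: for each field in a prefix table, scan the stripped lines back to front and take the first match (last-write-wins), building the result dict key by key.
import Mathlib
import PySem

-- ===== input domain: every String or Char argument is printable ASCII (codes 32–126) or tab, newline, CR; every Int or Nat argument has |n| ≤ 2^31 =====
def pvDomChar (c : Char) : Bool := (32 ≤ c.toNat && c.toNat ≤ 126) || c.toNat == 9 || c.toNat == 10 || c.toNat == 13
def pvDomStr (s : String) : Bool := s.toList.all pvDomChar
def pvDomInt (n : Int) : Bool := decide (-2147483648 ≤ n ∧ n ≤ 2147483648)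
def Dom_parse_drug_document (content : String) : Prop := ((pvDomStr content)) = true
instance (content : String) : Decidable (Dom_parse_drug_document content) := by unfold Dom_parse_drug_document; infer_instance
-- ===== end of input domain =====

-- B replaces A's line-major if/elif overwrite loop by a field-major back-to-front scan per prefix (alternative decomposition, same cost).


-- ===== PORT A =====
-- line.replace(prefix, '').strip()
def pvVal (p l : String) : String := PySem.Str.strip (PySem.Str.replace l p "")

-- the body of A's for-loop on the already-stripped line (the if/elif chain)
def pvStep (d : PySem.Dict String String) (line : String) : PySem.Dict String String :=
  if PySem.Str.startswith line "Loai Thuoc:" then d.insert "drug_name" (pvVal "Loai Thuoc:" line)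
  else if PySem.Str.startswith line "Doi Tuong:" then d.insert "target" (pvVal "Doi Tuong:" line)
  else if PySem.Str.startswith line "Mo ta:" then d.insert "description" (pvVal "Mo ta:" line)
  else if PySem.Str.startswith line "Phan Loai:" then d.insert "category" (pvVal "Phan Loai:" line)
  else if PySem.Str.startswith line "Nguon:" then d.insert "source" (pvVal "Nguon:" line)
  else if PySem.Str.startswith line "Khuyen cao:" then d.insert "recommendation" (pvVal "Khuyen cao:" line)
  else d

def parse_drug_document (content : String) : List (String × String) :=
  let lines := ((PySem.Str.split? content "\n").getD [])
  let parsed : PySem.Dict String String := PySem.Dict.ofList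
    [("drug_name", ""), ("target", ""), ("description", ""),
     ("category", ""), ("source", ""), ("recommendation", "")]
  (lines.foldl (fun d line => pvStep d (PySem.Str.strip line)) parsed).items

-- ===== PORT B =====
def pvFields : List (String × String) :=
  [("Loai Thuoc:", "drug_name"), ("Doi Tuong:", "target"), ("Mo ta:", "description"),
   ("Phan Loai:", "category"), ("Nguon:", "source"), ("Khuyen cao:", "recommendation")]

-- value = dflt; for line in xs: if line.startswith(p): value = line.replace(p,'').strip(); break
def pvFirstD (p dflt : String) : List String → String
  | [] => dflt
  | l :: rest =>
    if PySem.Str.startswith l p then PySem.Str.strip (PySem.Str.replace l p "")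
    else pvFirstD p dflt rest

def parse_drug_document_alt (content : String) : List (String × String) :=
  let lines := (((PySem.Str.split? content "\n").getD [])).map PySem.Str.strip
  (pvFields.foldl
    (fun r pf => r.insert pf.2 (pvFirstD pf.1 "" lines.reverse))
    PySem.Dict.empty).items

-- ===== PRECONDITION & SPEC =====
def Spec_parse_drug_document (content : String) (out : List (String × String)) : Prop := out = parse_drug_document_alt content
instance (content : String) (out : List (String × String)) : Decidable (Spec_parse_drug_document content out) := by unfold Spec_parse_drug_document; infer_instance

-- ===== CLAIM (what is proved, stated in full; the proofs are below) =====
def Claim_equal_parse_drug_document : Prop := ∀ (content : String), Dom_parse_drug_document content → Spec_parse_drug_document content (parse_drug_document content)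

-- ===== LEMMAS AND PROOFS =====

-- "last match scanning forward" = "first match scanning the reverse"
def pvLastD (p dflt : String) (ls : List String) : String := pvFirstD p dflt ls.reverse

lemma pvFirstD_append (p dflt : String) (xs : List String) (l : String) :
    pvFirstD p dflt (xs ++ [l])
      = pvFirstD p (if PySem.Str.startswith l p then pvVal p l else dflt) xs := by
  induction xs with
  | nil => simp [pvFirstD, pvVal]
  | cons x xs ih => simp only [List.cons_append, pvFirstD, ih]

lemma pvLastD_cons (p dflt l : String) (ls : List String) :
    pvLastD p dflt (l :: ls)
      = pvLastD p (if PySem.Str.startswith l p then pvVal p l else dflt) ls := by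
  simp only [pvLastD, List.reverse_cons, pvFirstD_append]

-- a line starting with p cannot also start with q when their first characters differ
lemma pv_excl (l p q : String) (h : PySem.Str.startswith l p = true)
    (hp : p.toList ≠ []) (hq : q.toList ≠ [])
    (hne : p.toList.head? ≠ q.toList.head?) :
    PySem.Str.startswith l q = false := by
  rw [PySem.Str.startswith_eq] at h ⊢
  rw [PySem.Chars.startswith_iff] at h
  by_contra hcon
  rw [Bool.not_eq_false, PySem.Chars.startswith_iff] at hcon
  obtain ⟨tp, htp⟩ := h
  obtain ⟨tq, htq⟩ := hcon
  cases hP : p.toList with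
  | nil => exact hp hP
  | cons cp rp =>
    cases hQ : q.toList with
    | nil => exact hq hQ
    | cons cq rq =>
      rw [hP] at htp; rw [hQ] at htq
      have h1 : l.toList.head? = some cp := by rw [← htp]; rfl
      have h2 : l.toList.head? = some cq := by rw [← htq]; rfl
      apply hne
      rw [hP, hQ, List.head?_cons, List.head?_cons]
      exact h1.symm.trans h2

-- the heart: folding A's chain over stripped lines yields, per field, the last matching value
lemma pv_main (ls : List String) : ∀ a b c d e f : String,
    (ls.foldl pvStep (PySem.Dict.mk
      [("drug_name", a), ("target", b), ("description", c),
       ("category", d), ("source", e), ("recommendation", f)])).items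
    = [("drug_name", pvLastD "Loai Thuoc:" a ls),
       ("target", pvLastD "Doi Tuong:" b ls),
       ("description", pvLastD "Mo ta:" c ls),
       ("category", pvLastD "Phan Loai:" d ls),
       ("source", pvLastD "Nguon:" e ls),
       ("recommendation", pvLastD "Khuyen cao:" f ls)] := by
  induction ls with
  | nil => intro a b c d e f; rfl
  | cons l ls ih =>
    intro a b c d e f
    rw [List.foldl_cons]
    rw [pvLastD_cons, pvLastD_cons, pvLastD_cons, pvLastD_cons, pvLastD_cons, pvLastD_cons]
    by_cases h1 : PySem.Str.startswith l "Loai Thuoc:" = true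
    · have e2 := pv_excl l "Loai Thuoc:" "Doi Tuong:" h1 (by decide) (by decide) (by decide)
      have e3 := pv_excl l "Loai Thuoc:" "Mo ta:" h1 (by decide) (by decide) (by decide)
      have e4 := pv_excl l "Loai Thuoc:" "Phan Loai:" h1 (by decide) (by decide) (by decide)
      have e5 := pv_excl l "Loai Thuoc:" "Nguon:" h1 (by decide) (by decide) (by decide)
      have e6 := pv_excl l "Loai Thuoc:" "Khuyen cao:" h1 (by decide) (by decide) (by decide)
      simp only [pvStep, h1, e2, e3, e4, e5, e6, if_true, if_false, Bool.false_eq_true]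
      exact ih (pvVal "Loai Thuoc:" l) b c d e f
    · by_cases h2 : PySem.Str.startswith l "Doi Tuong:" = true
      · have e3 := pv_excl l "Doi Tuong:" "Mo ta:" h2 (by decide) (by decide) (by decide)
        have e4 := pv_excl l "Doi Tuong:" "Phan Loai:" h2 (by decide) (by decide) (by decide)
        have e5 := pv_excl l "Doi Tuong:" "Nguon:" h2 (by decide) (by decide) (by decide)
        have e6 := pv_excl l "Doi Tuong:" "Khuyen cao:" h2 (by decide) (by decide) (by decide)
        simp only [pvStep, h1, h2, e3, e4, e5, e6, if_true, if_false, Bool.false_eq_true]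
        exact ih a (pvVal "Doi Tuong:" l) c d e f
      · by_cases h3 : PySem.Str.startswith l "Mo ta:" = true
        · have e4 := pv_excl l "Mo ta:" "Phan Loai:" h3 (by decide) (by decide) (by decide)
          have e5 := pv_excl l "Mo ta:" "Nguon:" h3 (by decide) (by decide) (by decide)
          have e6 := pv_excl l "Mo ta:" "Khuyen cao:" h3 (by decide) (by decide) (by decide)
          simp only [pvStep, h1, h2, h3, e4, e5, e6, if_true, if_false, Bool.false_eq_true]
          exact ih a b (pvVal "Mo ta:" l) d e f
        · by_cases h4 : PySem.Str.startswith l "Phan Loai:" = true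
          · have e5 := pv_excl l "Phan Loai:" "Nguon:" h4 (by decide) (by decide) (by decide)
            have e6 := pv_excl l "Phan Loai:" "Khuyen cao:" h4 (by decide) (by decide) (by decide)
            simp only [pvStep, h1, h2, h3, h4, e5, e6, if_true, if_false, Bool.false_eq_true]
            exact ih a b c (pvVal "Phan Loai:" l) e f
          · by_cases h5 : PySem.Str.startswith l "Nguon:" = true
            · have e6 := pv_excl l "Nguon:" "Khuyen cao:" h5 (by decide) (by decide) (by decide)
              simp only [pvStep, h1, h2, h3, h4, h5, e6, if_true, if_false, Bool.false_eq_true]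
              exact ih a b c d (pvVal "Nguon:" l) f
            · by_cases h6 : PySem.Str.startswith l "Khuyen cao:" = true
              · simp only [pvStep, h1, h2, h3, h4, h5, h6, if_true, if_false, Bool.false_eq_true]
                exact ih a b c d e (pvVal "Khuyen cao:" l)
              · simp only [pvStep, h1, h2, h3, h4, h5, h6, if_false, Bool.false_eq_true]
                exact ih a b c d e f

-- ===== VERDICT (by name: the statement is the Claim_ definition above) =====
theorem parse_drug_document_spec : Claim_equal_parse_drug_document := by
  intro content _
  unfold Spec_parse_drug_document
  show (List.foldl (fun d line => pvStep d (PySem.Str.strip line))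
      (PySem.Dict.mk [("drug_name", ""), ("target", ""), ("description", ""),
        ("category", ""), ("source", ""), ("recommendation", "")])
      ((PySem.Str.split? content "\n").getD [])).items
    = parse_drug_document_alt content
  rw [← List.foldl_map]
  rw [pv_main]
  rfl
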